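-- pv_equiv track=rewrite | github.com/alswo1212/jungle_baekjoon | 프로그래머스/2/60058. 괄호 변환/괄호 변환.py | solution
-- ===== SOURCE A (Python) =====
-- from collections import defaultdict
--
-- def solution(p):
--     if p == '':
--         return p
--     counter = defaultdict(int)
--     i = 0
--     while i < len(p):
--         counter[p[i]] += 1
--         i+=1
--         if counter['('] == counter[')']:
--             break
--
--     u, v = p[:i], p[i:]
--     if u[0] == '(':
--         return u+solution(v)
--
--     answer = '(' + solution(v) + ')'
--     for i in range(1, len(u)-1):
--         if u[i] == ')':
--             answer += '('
--         else:
--             answer += ')'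
--     return answer
-- ===== SOURCE B (Python) =====
-- def solution(p):
--     # pass 1: split p into the consecutive minimal chunks where the '('/')' balance returns to 0
--     chunks = []
--     cur = []
--     bal = 0
--     for ch in p:
--         cur.append(ch)
--         if ch == '(':
--             bal += 1
--         elif ch == ')':
--             bal -= 1
--         if bal == 0:
--             chunks.append(''.join(cur))
--             cur = []
--             bal = 0
--     if cur:
--         chunks.append(''.join(cur))
--     # pass 2: fold the chunk list right-to-left instead of recursing
--     acc = ''
--     for chunk in reversed(chunks):
--         if chunk[0] == '(':
--             acc = chunk + acc
--         else:
--             flipped = ''.join('(' if c == ')' else ')' for c in chunk[1:-1])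
--             acc = '(' + acc + ')' + flipped
--     return acc
-- ===== Notes on version B (the rewrite author's own statement) =====
-- stated objective: alternative
-- what changed: A's tail recursion (peel one minimal balanced chunk with a defaultdict counter, recurse on the rest) is replaced by two explicit passes: one loop that splits p into the full list of minimal balanced chunks with an integer balance counter, then an iterative right-to-left fold over that chunk list building the answer in an accumulator.
import Mathlib
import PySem

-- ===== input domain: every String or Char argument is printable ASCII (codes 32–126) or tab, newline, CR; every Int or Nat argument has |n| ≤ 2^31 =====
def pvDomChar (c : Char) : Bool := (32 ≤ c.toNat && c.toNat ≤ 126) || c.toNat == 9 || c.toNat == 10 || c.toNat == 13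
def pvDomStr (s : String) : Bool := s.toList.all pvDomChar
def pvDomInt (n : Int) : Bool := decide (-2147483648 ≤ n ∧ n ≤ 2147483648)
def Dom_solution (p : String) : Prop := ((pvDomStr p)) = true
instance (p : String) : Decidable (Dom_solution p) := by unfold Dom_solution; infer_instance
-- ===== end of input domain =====

-- B replaces A's tail recursion with two passes: one loop collecting the minimal balanced
-- chunks, then a right-to-left fold over that chunk list (objective: alternative decomposition).


-- ===== PORT A =====
-- the while loop: counter[p[i]] += 1; i += 1; break when counter['('] == counter[')'];
-- structural recursion over the not-yet-visited characters (= p[i:]), carrying i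
def solLoopA : List Char → PySem.Dict Char Int → Nat → Nat
  | [], _, i => i
  | c :: rest, counter, i =>
    let counter' := counter.modify c 0 (· + 1)
    if counter'.getD '(' 0 = counter'.getD ')' 0 then i + 1
    else solLoopA rest counter' (i + 1)

-- the loop body runs at least once (needed for solRecA's termination)
theorem solLoopA_lb (l : List Char) (counter : PySem.Dict Char Int) (i : Nat)
    (h : l ≠ []) : i + 1 ≤ solLoopA l counter i := by
  cases l with
  | nil => exact absurd rfl h
  | cons c rest =>
    rw [solLoopA]
    split
    · exact Nat.le_refl _
    · cases rest with
      | nil => rw [solLoopA]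
      | cons d rest' =>
        exact Nat.le_trans (Nat.le_succ _) (solLoopA_lb (d :: rest') _ (i + 1) (by simp))

theorem solRecA_dec (p : List Char) (hp : ¬ p = []) :
    (p.drop (solLoopA p PySem.Dict.empty 0)).length < p.length := by
  have h1 : 1 ≤ solLoopA p PySem.Dict.empty 0 := solLoopA_lb p _ 0 hp
  have h2 : 0 < p.length := List.length_pos_iff.mpr hp
  simp only [List.length_drop]
  omega

def solRecA (p : List Char) : List Char :=
  if hp : p = [] then p
  else
    let i := solLoopA p PySem.Dict.empty 0
    let u := p.take i
    let v := p.drop i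
    if u.head? = some '(' then u ++ solRecA v
    else
      -- answer = '(' + solution(v) + ')' followed by the flip loop over u[i], i ∈ range(1, len(u)-1),
      -- i.e. exactly the elements of u[1:-1]
      ((u.drop 1).dropLast).foldl
        (fun ans c => ans ++ [if c = ')' then '(' else ')'])
        ('(' :: solRecA v ++ [')'])
termination_by p.length
decreasing_by all_goals exact solRecA_dec p hp

def solution (p : String) : String := String.ofList (solRecA p.toList)

-- ===== PORT B =====
-- one step of pass 1: append ch to cur, update bal, close the chunk when bal hits 0
def chunkStepB (st : List (List Char) × List Char × Int) (ch : Char) :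
    List (List Char) × List Char × Int :=
  let cur := st.2.1 ++ [ch]
  let bal := if ch = '(' then st.2.2 + 1 else if ch = ')' then st.2.2 - 1 else st.2.2
  if bal = 0 then (st.1 ++ [cur], [], 0) else (st.1, cur, bal)

-- the trailing 'if cur: chunks.append(...)' flush
def flushB (st : List (List Char) × List Char × Int) : List (List Char) :=
  if st.2.1 ≠ [] then st.1 ++ [st.2.1] else st.1

-- pass 2's loop body: prepend a '('-chunk, otherwise wrap and append the flipped interior
def gB (acc chunk : List Char) : List Char :=
  if chunk.head? = some '(' then chunk ++ acc
  else ('(' :: acc ++ [')']) ++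
    ((chunk.drop 1).dropLast).map (fun c => if c = ')' then '(' else ')')  -- chunk[1:-1] flipped

def solRecB (p : List Char) : List Char :=
  (flushB (p.foldl chunkStepB ([], [], 0))).reverse.foldl gB []

def solution_alt (p : String) : String := String.ofList (solRecB p.toList)

-- ===== PRECONDITION & SPEC =====
def Spec_solution (p : String) (out : String) : Prop := out = solution_alt p
instance (p : String) (out : String) : Decidable (Spec_solution p out) := by unfold Spec_solution; infer_instance

-- ===== CLAIM (what is proved, stated in full; the proofs are below) =====
def Claim_equal_solution : Prop := ∀ (p : String), Dom_solution p → Spec_solution p (solution p)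

-- ===== LEMMAS AND PROOFS =====

-- balance update by one character
def upd (b : Int) (c : Char) : Int :=
  if c = '(' then b + 1 else if c = ')' then b - 1 else b

-- position (counted from the start of l) after which the running balance (starting at b)
-- first becomes 0; none if it never does
def brkO : List Char → Int → Option Nat
  | [], _ => none
  | c :: rest, b =>
    let b' := upd b c
    if b' = 0 then some 1 else (brkO rest b').map (· + 1)

def brkN (l : List Char) (b : Int) : Nat := (brkO l b).getD l.length

theorem brkO_le (l : List Char) (b : Int) (k : Nat) (h : brkO l b = some k) :
    1 ≤ k ∧ k ≤ l.length := by
  induction l generalizing b k with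
  | nil => simp [brkO] at h
  | cons c rest ih =>
    simp only [brkO] at h
    split at h
    · cases h; simp
    · cases hk : brkO rest (upd b c) with
      | none => rw [hk] at h; simp at h
      | some j =>
        rw [hk] at h
        cases h
        have := ih _ _ hk
        simp only [List.length_cons]
        omega

theorem brkN_pos (l : List Char) (b : Int) (h : l ≠ []) : 1 ≤ brkN l b := by
  unfold brkN
  cases hk : brkO l b with
  | none =>
    cases l with
    | nil => exact absurd rfl h
    | cons a t => simp
  | some k => exact (brkO_le l b k hk).1

theorem brkN_cons (c : Char) (rest : List Char) (b : Int) :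
    brkN (c :: rest) b = if upd b c = 0 then 1 else brkN rest (upd b c) + 1 := by
  unfold brkN
  by_cases hz : upd b c = 0 <;>
    cases hk : brkO rest (upd b c) <;>
      simp [brkO, hz, hk]

-- the two relevant counts of A's dict change by exactly the balance update
theorem dict_diff_modify (counter : PySem.Dict Char Int) (c : Char) :
    (counter.modify c 0 (· + 1)).getD '(' 0 - (counter.modify c 0 (· + 1)).getD ')' 0
      = upd (counter.getD '(' 0 - counter.getD ')' 0) c := by
  unfold upd
  by_cases h1 : c = '('
  · subst h1
    rw [PySem.Dict.getD_modify_self, PySem.Dict.getD_modify_of_ne counter 0 (· + 1) (by decide)]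
    simp
    omega
  · by_cases h2 : c = ')'
    · subst h2
      rw [PySem.Dict.getD_modify_self, PySem.Dict.getD_modify_of_ne counter 0 (· + 1) (by decide)]
      simp
      omega
    · rw [PySem.Dict.getD_modify_of_ne counter 0 (· + 1) (Ne.symm h1),
          PySem.Dict.getD_modify_of_ne counter 0 (· + 1) (Ne.symm h2)]
      simp [h1, h2]

-- A's loop computes i plus the first balance-return position of the remaining characters
theorem solLoopA_eq (l : List Char) (counter : PySem.Dict Char Int) (i : Nat) :
    solLoopA l counter i = i + brkN l (counter.getD '(' 0 - counter.getD ')' 0) := by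
  induction l generalizing counter i with
  | nil => simp [solLoopA, brkN, brkO]
  | cons c rest ih =>
    rw [solLoopA, brkN_cons]
    have hd := dict_diff_modify counter c
    by_cases hz : upd (counter.getD '(' 0 - counter.getD ')' 0) c = 0
    · have hcond : (counter.modify c 0 (· + 1)).getD '(' 0
          = (counter.modify c 0 (· + 1)).getD ')' 0 := by omega
      rw [if_pos hcond, if_pos hz]
    · have hcond : ¬ (counter.modify c 0 (· + 1)).getD '(' 0
          = (counter.modify c 0 (· + 1)).getD ')' 0 := by omega
      rw [if_neg hcond, if_neg hz, ih, hd]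
      omega

-- the recursive chunk decomposition that pass 1 of B computes
theorem chunksOf_dec (l : List Char) (h : ¬ l = []) :
    (l.drop (brkN l 0)).length < l.length := by
  have h1 : 1 ≤ brkN l 0 := brkN_pos l 0 h
  have h2 : 0 < l.length := List.length_pos_iff.mpr h
  simp only [List.length_drop]
  omega

def chunksOf (l : List Char) : List (List Char) :=
  if h : l = [] then []
  else l.take (brkN l 0) :: chunksOf (l.drop (brkN l 0))
termination_by l.length
decreasing_by all_goals exact chunksOf_dec l h

theorem chunksOf_nil : chunksOf [] = [] := by
  unfold chunksOf
  simp

theorem chunkStepB_eq (cs : List (List Char)) (cur : List Char) (b : Int) (c : Char) :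
    chunkStepB (cs, cur, b) c =
      if upd b c = 0 then (cs ++ [cur ++ [c]], [], 0) else (cs, cur ++ [c], upd b c) := rfl

-- pass-1 invariant, balance never returns to 0 on l: everything joins cur
theorem foldl_chunkStepB_none (l : List Char) (cs : List (List Char)) (cur : List Char) (b : Int)
    (h : brkO l b = none) :
    l.foldl chunkStepB (cs, cur, b) = (cs, cur ++ l, l.foldl (fun a c => upd a c) b) := by
  induction l generalizing cs cur b with
  | nil => simp
  | cons c rest ih =>
    by_cases hz : upd b c = 0
    · exfalso; simp [brkO, hz] at h
    · have hrest : brkO rest (upd b c) = none := by simpa [brkO, hz] using h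
      rw [List.foldl_cons, chunkStepB_eq, if_neg hz, ih _ _ _ hrest]
      simp

-- pass-1 invariant, balance first returns to 0 after k characters: a chunk closes there
theorem foldl_chunkStepB_some (l : List Char) (cs : List (List Char)) (cur : List Char) (b : Int)
    (k : Nat) (h : brkO l b = some k) :
    l.foldl chunkStepB (cs, cur, b)
      = (l.drop k).foldl chunkStepB (cs ++ [cur ++ l.take k], [], 0) := by
  induction l generalizing cs cur b k with
  | nil => simp [brkO] at h
  | cons c rest ih =>
    by_cases hz : upd b c = 0
    · obtain rfl : k = 1 := by
        have : some 1 = some k := by simpa [brkO, hz] using h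
        simpa using this.symm
      rw [List.foldl_cons, chunkStepB_eq, if_pos hz]
      simp
    · have h' : (brkO rest (upd b c)).map (· + 1) = some k := by simpa [brkO, hz] using h
      cases hk : brkO rest (upd b c) with
      | none => rw [hk] at h'; simp at h'
      | some j =>
        rw [hk] at h'
        obtain rfl : j + 1 = k := by simpa using h'
        rw [List.foldl_cons, chunkStepB_eq, if_neg hz, ih _ _ _ _ hk]
        simp

-- pass 1 (with the trailing flush) computes exactly the chunk decomposition
theorem pass1_eq (l : List Char) (cs : List (List Char)) :
    flushB (l.foldl chunkStepB (cs, [], 0)) = cs ++ chunksOf l := by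
  induction hn : l.length using Nat.strong_induction_on generalizing l cs with
  | _ n ih =>
    subst hn
    by_cases hl : l = []
    · subst hl; simp [flushB, chunksOf_nil]
    · rw [chunksOf]
      simp only [dif_neg hl]
      cases hk : brkO l 0 with
      | none =>
        rw [foldl_chunkStepB_none l cs [] 0 hk]
        have hbl : brkN l 0 = l.length := by simp [brkN, hk]
        rw [hbl]
        simp [flushB, hl, List.take_length, List.drop_length, chunksOf_nil]
      | some k =>
        rw [foldl_chunkStepB_some l cs [] 0 k hk]
        have hkb := brkO_le l 0 k hk
        have hbk : brkN l 0 = k := by simp [brkN, hk]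
        rw [hbk]
        have hlen : (l.drop k).length < l.length := by
          simp only [List.length_drop]; omega
        simp only [List.nil_append]
        rw [ih _ hlen _ (cs ++ [l.take k]) rfl]
        simp

theorem fold_cons (c : List Char) (cs : List (List Char)) :
    (c :: cs).reverse.foldl gB [] = gB (cs.reverse.foldl gB []) c := by
  simp [List.foldl_append]

-- A's flip loop (foldl appending singletons) equals B's map appended to the prefix
theorem flip_foldl (l init : List Char) :
    l.foldl (fun ans c => ans ++ [if c = ')' then '(' else ')']) init
      = init ++ l.map (fun c => if c = ')' then '(' else ')') :=
  PySem.List.foldl_append_singleton_eq_map _ l init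

theorem solRecB_eq_fold (p : List Char) :
    solRecB p = (chunksOf p).reverse.foldl gB [] := by
  unfold solRecB
  rw [pass1_eq p [], List.nil_append]

-- main equivalence on lists
theorem solRecA_eq_B (p : List Char) : solRecA p = solRecB p := by
  rw [solRecB_eq_fold]
  induction hn : p.length using Nat.strong_induction_on generalizing p with
  | _ n ih =>
    subst hn
    by_cases hp : p = []
    · subst hp
      rw [solRecA]
      simp [chunksOf_nil]
    · have hloop : solLoopA p PySem.Dict.empty 0 = brkN p 0 := by
        have h1 := solLoopA_eq p PySem.Dict.empty 0
        have h0 : (PySem.Dict.empty : PySem.Dict Char Int).getD '(' 0 = 0 := by decide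
        have h0' : (PySem.Dict.empty : PySem.Dict Char Int).getD ')' 0 = 0 := by decide
        rw [h0, h0'] at h1
        simpa using h1
      have h2 : 0 < p.length := List.length_pos_iff.mpr hp
      have h1 : 1 ≤ brkN p 0 := brkN_pos p 0 hp
      have hih : solRecA (p.drop (brkN p 0)) = (chunksOf (p.drop (brkN p 0))).reverse.foldl gB [] :=
        ih ((p.drop (brkN p 0)).length) (by simp only [List.length_drop]; omega) _ rfl
      rw [solRecA]
      simp only [dif_neg hp, hloop]
      rw [chunksOf]
      simp only [dif_neg hp]
      rw [fold_cons]
      simp only [gB]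
      split
      · rw [hih]
      · rw [flip_foldl, hih]

-- ===== VERDICT (by name: the statement is the Claim_ definition above) =====
theorem solution_spec : Claim_equal_solution := by
  intro p _
  unfold Spec_solution solution solution_alt
  rw [solRecA_eq_B]
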